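-- pv_equiv track=rewrite | github.com/jenfrie/tova | tools/bgp/deagg-asns.py | prefix2asns
-- ===== SOURCE A (Python) =====
-- from typing import List, Tuple, Any, Set, Iterable
--
-- def prefix2asns(asn: str, prefix_paths: List[Tuple[str, List[str]]]) -> dict:
--     pfx2asn = {}
--     for prefix, as_path in prefix_paths:
--         as_path = remove_all_of(asn, as_path)
--         try:
--             pfx2asn[prefix] = pfx2asn.setdefault(prefix, set()).union({as_path[-1]})
--         except IndexError:
--             pfx2asn[prefix] = pfx2asn.setdefault(prefix, set()).union({asn})
--     return pfx2asn
--
-- def remove_all_of(r: str, l: List[str]) -> List[str]: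
--     return [x for x in l if x != r]
-- ===== SOURCE B (Python) =====
-- def prefix2asns(asn, prefix_paths):
--     pfx2asn = {}
--     for prefix, as_path in prefix_paths:
--         val = asn
--         for hop in reversed(as_path):
--             if hop != asn:
--                 val = hop
--                 break
--         pfx2asn.setdefault(prefix, set()).add(val)
--     return pfx2asn
-- ===== Notes on version B (the rewrite author's own statement) =====
-- stated objective: simpler
-- what changed: B replaces the filtered-copy-plus-negative-index-plus-try/except of A by a reverse early-terminating scan for the first hop different from asn (default asn), added into the set via setdefault, with no helper and no exception handling.
import Mathlib
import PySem

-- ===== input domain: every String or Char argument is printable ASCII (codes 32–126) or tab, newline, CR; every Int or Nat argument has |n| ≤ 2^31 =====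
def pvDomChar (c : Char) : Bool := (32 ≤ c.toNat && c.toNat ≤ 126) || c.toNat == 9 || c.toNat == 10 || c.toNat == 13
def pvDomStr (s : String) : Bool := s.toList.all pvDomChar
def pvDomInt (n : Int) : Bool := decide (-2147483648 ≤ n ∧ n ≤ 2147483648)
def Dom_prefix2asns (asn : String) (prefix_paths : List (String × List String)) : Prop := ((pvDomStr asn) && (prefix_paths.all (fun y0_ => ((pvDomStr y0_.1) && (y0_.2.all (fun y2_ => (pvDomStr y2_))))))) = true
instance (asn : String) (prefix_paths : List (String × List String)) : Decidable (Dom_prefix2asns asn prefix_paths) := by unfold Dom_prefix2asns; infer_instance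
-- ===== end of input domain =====

-- B replaces A's filtered copy + negative index + try/except by a reverse early-terminating
-- scan for the first hop ≠ asn (default asn); same return value, simpler decomposition.

-- ===== PORT A =====
def removeAllOf (r : String) (l : List String) : List String :=
  l.filter (fun x => x != r)

def prefix2asns (asn : String) (prefix_paths : List (String × List String)) : List (String × List String) :=
  (prefix_paths.foldl (fun (d : PySem.Dict String (List String)) pp =>
    let ap := removeAllOf asn pp.2
    -- setdefault's side effect happens before as_path[-1] is evaluated; kept explicitly
    let d1 := d.setdefault pp.1 PySem.Set.empty
    match PySem.List.pyGet? ap (-1) with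
    | some v => d1.insert pp.1 (PySem.Set.union (d1.getD pp.1 PySem.Set.empty) [v])
    | none   => d1.insert pp.1 (PySem.Set.union (d1.getD pp.1 PySem.Set.empty) [asn])
    ) PySem.Dict.empty).items

-- ===== PORT B =====
def lastNonSelf (asn : String) : List String → String
  | [] => asn
  | hop :: rest => if hop != asn then hop else lastNonSelf asn rest

def prefix2asns_alt (asn : String) (prefix_paths : List (String × List String)) : List (String × List String) :=
  (prefix_paths.foldl (fun (d : PySem.Dict String (List String)) pp =>
    let val := lastNonSelf asn pp.2.reverse
    let d1 := d.setdefault pp.1 PySem.Set.empty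
    d1.insert pp.1 (PySem.Set.add (d1.getD pp.1 PySem.Set.empty) val)
    ) PySem.Dict.empty).items

-- ===== PRECONDITION & SPEC =====
def Spec_prefix2asns (asn : String) (prefix_paths : List (String × List String)) (out : List (String × List String)) : Prop := out = prefix2asns_alt asn prefix_paths
instance (asn : String) (prefix_paths : List (String × List String)) (out : List (String × List String)) : Decidable (Spec_prefix2asns asn prefix_paths out) := by unfold Spec_prefix2asns; infer_instance

-- ===== CLAIM (what is proved, stated in full; the proofs are below) =====
def Claim_equal_prefix2asns : Prop := ∀ (asn : String) (prefix_paths : List (String × List String)), Dom_prefix2asns asn prefix_paths → Spec_prefix2asns asn prefix_paths (prefix2asns asn prefix_paths)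

-- ===== LEMMAS AND PROOFS =====

theorem lastNonSelf_eq (asn : String) (m : List String) :
    lastNonSelf asn m = ((m.filter (fun x => x != asn)).head?).getD asn := by
  induction m with
  | nil => rfl
  | cons h t ih =>
    by_cases hc : (h != asn) = true
    · simp [lastNonSelf, hc]
    · simp [lastNonSelf, hc, ih]

theorem value_eq (asn : String) (path : List String) :
    (match PySem.List.pyGet? (removeAllOf asn path) (-1) with
      | some v => v | none => asn) = lastNonSelf asn path.reverse := by
  rw [lastNonSelf_eq, PySem.List.pyGet?_neg_one]
  rw [List.filter_reverse, List.head?_reverse]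
  unfold removeAllOf
  cases (path.filter (fun x => x != asn)).getLast? <;> rfl

theorem step_eq (asn : String) (d : PySem.Dict String (List String)) (pp : String × List String) :
    (let ap := removeAllOf asn pp.2
     let d1 := d.setdefault pp.1 PySem.Set.empty
     match PySem.List.pyGet? ap (-1) with
     | some v => d1.insert pp.1 (PySem.Set.union (d1.getD pp.1 PySem.Set.empty) [v])
     | none   => d1.insert pp.1 (PySem.Set.union (d1.getD pp.1 PySem.Set.empty) [asn]))
    = (let val := lastNonSelf asn pp.2.reverse
       let d1 := d.setdefault pp.1 PySem.Set.empty
       d1.insert pp.1 (PySem.Set.add (d1.getD pp.1 PySem.Set.empty) val)) := by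
  have hv := value_eq asn pp.2
  have hu : ∀ (s : List String) (v : String),
      PySem.Set.union s [v] = PySem.Set.add s v := by
    intro s v; simp [PySem.Set.union, PySem.Set.update]
  cases hg : PySem.List.pyGet? (removeAllOf asn pp.2) (-1) with
  | some v => simp only [hg] at hv ⊢; rw [← hv, hu]
  | none => simp only [hg] at hv ⊢; rw [← hv, hu]

-- ===== VERDICT (by name: the statement is the Claim_ definition above) =====
theorem prefix2asns_spec : Claim_equal_prefix2asns := by
  intro asn pps _
  unfold Spec_prefix2asns prefix2asns prefix2asns_alt
  congr 1
  apply PySem.List.foldl_congr_mem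
  intro d pp _
  exact step_eq asn d pp
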